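-- pv_equiv track=rewrite | github.com/Gonzalo-Ortega/URJC-Algorithm-Design-and-Analysis-Course | Exercices/1. Graphs covering algorithms/Baile-TikTok.py | get_reached_nodes
-- ===== SOURCE A (Python) =====
-- from collections import deque
--
-- def get_reached_nodes(graph, level):
--     visited = set()
--     next_level_nodes = deque()
--     visited.add(0)
--     next_level_nodes.append(0)
--     iteration = 1
--     level_nodes = next_level_nodes
--     while len(level_nodes) > 0 and iteration < level:
--         iteration += 1
--         next_level_nodes = deque()
--         while level_nodes:
--             aux = level_nodes.popleft()
--             for adj in graph[aux]:
--                 if adj not in visited: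
--                     visited.add(adj)
--                     next_level_nodes.append(adj)
--         level_nodes = next_level_nodes
--     return len(visited)
-- ===== SOURCE B (Python) =====
-- def get_reached_nodes(graph, level):
--     # Bounded-distance Bellman-Ford-style relaxation over the dict's edges;
--     # dist holds the BFS depth of every node discovered within level-1 steps.
--     dist = {0: 0}
--     for _ in range(len(graph)):
--         changed = False
--         for node, neighbours in graph.items():
--             d = dist.get(node)
--             if d is not None and d <= level - 2:
--                 for a in neighbours:
--                     if a not in dist or dist[a] > d + 1:
--                         dist[a] = d + 1
--                         changed = True
--         if not changed:
--             break
--     return len(dist)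
-- ===== Notes on version B (the rewrite author's own statement) =====
-- stated objective: alternative
-- what changed: Replaces the two-deque level-synchronous BFS with a Bellman-Ford-style bounded-distance relaxation: a dict mapping node to BFS depth is repeatedly relaxed by full passes over all graph entries (at most len(graph) passes, with an early exit when a pass changes nothing), and the result is the number of dict entries.
import Mathlib
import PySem

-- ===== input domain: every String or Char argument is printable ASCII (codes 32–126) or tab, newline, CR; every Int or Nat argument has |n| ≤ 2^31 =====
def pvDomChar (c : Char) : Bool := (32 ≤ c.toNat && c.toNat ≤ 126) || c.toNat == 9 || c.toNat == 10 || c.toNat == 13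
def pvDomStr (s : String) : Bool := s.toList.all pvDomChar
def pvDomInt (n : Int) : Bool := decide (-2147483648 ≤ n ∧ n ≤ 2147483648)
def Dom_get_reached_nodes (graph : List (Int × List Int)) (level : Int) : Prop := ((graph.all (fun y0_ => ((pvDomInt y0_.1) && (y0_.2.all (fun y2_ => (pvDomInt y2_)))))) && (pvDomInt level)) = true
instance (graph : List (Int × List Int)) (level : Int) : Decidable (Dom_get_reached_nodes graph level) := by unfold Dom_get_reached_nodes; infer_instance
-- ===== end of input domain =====

-- B replaces A's two-deque level-synchronous BFS by a Bellman-Ford-style bounded-distance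
-- relaxation over the dict's edges (len(graph) full passes with an early exit), returning
-- the number of dict entries of the distance table (objective: alternative).

-- ===== PORT A =====
-- graph[a]: dict lookup; Pre_get_reached_nodes excludes exactly the KeyError inputs
def pvAdj (graph : List (Int × List Int)) (a : Int) : List Int :=
  ((PySem.Dict.ofList graph).get? a).getD []

-- inner 'while level_nodes: aux = popleft(); for adj in graph[aux]: …'; state = (visited, next_level_nodes)
def pvInnerA (graph : List (Int × List Int)) : List Int → PySem.Set Int × List Int → PySem.Set Int × List Int
  | [], st => st
  | aux :: rest, st =>
      pvInnerA graph rest ((pvAdj graph aux).foldl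
        (fun (st : PySem.Set Int × List Int) adj =>
          if PySem.Set.contains st.1 adj then st else (PySem.Set.add st.1 adj, st.2 ++ [adj])) st)

-- outer 'while len(level_nodes) > 0 and iteration < level'; fuel = level - iteration (iteration starts at 1)
def pvOuterA (graph : List (Int × List Int)) : Nat → List Int → PySem.Set Int → PySem.Set Int
  | 0, _, visited => visited
  | _ + 1, [], visited => visited
  | fuel + 1, aux :: rest, visited =>
      let st := pvInnerA graph (aux :: rest) (visited, [])
      pvOuterA graph fuel st.2 st.1

def get_reached_nodes (graph : List (Int × List Int)) (level : Int) : Int :=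
  PySem.Set.len (pvOuterA graph (level - 1).toNat [0] (PySem.Set.add PySem.Set.empty 0))

-- ===== PORT B =====
-- 'for a in neighbours: if a not in dist or dist[a] > d + 1: dist[a] = d + 1; changed = True'
def pvRelaxB (st : PySem.Dict Int Int × Bool) (d : Int) (nbrs : List Int) : PySem.Dict Int Int × Bool :=
  nbrs.foldl (fun st a =>
    match st.1.get? a with
    | none => (st.1.insert a (d + 1), true)
    | some da => if d + 1 < da then (st.1.insert a (d + 1), true) else st) st

-- one pass 'for node, neighbours in graph.items(): d = dist.get(node); if d is not None and d <= level - 2: …'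
def pvRoundB (level : Int) (items : List (Int × List Int)) (dist : PySem.Dict Int Int) :
    PySem.Dict Int Int × Bool :=
  items.foldl (fun st p =>
    match st.1.get? p.1 with
    | some d => if d ≤ level - 2 then pvRelaxB st d p.2 else st
    | none => st) (dist, false)

-- 'for _ in range(len(graph)): … ; if not changed: break'
def pvRoundsB (level : Int) (items : List (Int × List Int)) : Nat → PySem.Dict Int Int → PySem.Dict Int Int
  | 0, dist => dist
  | k + 1, dist =>
      let st := pvRoundB level items dist
      if st.2 then pvRoundsB level items k st.1 else st.1

def get_reached_nodes_alt (graph : List (Int × List Int)) (level : Int) : Int :=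
  ((pvRoundsB level (PySem.Dict.ofList graph).items (PySem.Dict.ofList graph).size
      ((PySem.Dict.empty : PySem.Dict Int Int).insert 0 0)).size : Int)

-- ===== PRECONDITION & SPEC =====
def pvKeys (graph : List (Int × List Int)) : List Int := (PySem.Dict.ofList graph).keys

-- nodes within k BFS steps of node 0 (expansion through present keys only); list may repeat, only membership matters
def pvRL (graph : List (Int × List Int)) : Nat → List Int
  | 0 => [0]
  | k + 1 => pvRL graph k ++
      ((pvKeys graph).filter (fun p => decide (p ∈ pvRL graph k))).flatMap (pvAdj graph)

-- Pre_ excludes exactly the inputs on which the Python A raises KeyError: level ≥ 2 and some node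
-- within BFS distance level-2 of node 0 (reached through present keys) missing from the dict.
def Pre_get_reached_nodes (graph : List (Int × List Int)) (level : Int) : Prop :=
  level ≤ 1 ∨ ∀ x ∈ pvRL graph (min (level - 2).toNat (PySem.Dict.ofList graph).size), x ∈ pvKeys graph
instance (graph : List (Int × List Int)) (level : Int) : Decidable (Pre_get_reached_nodes graph level) := by
  unfold Pre_get_reached_nodes; infer_instance

def pvWitness_get_reached_nodes : (List (Int × List Int)) × Int := ([(0, [1]), (1, [0, 2]), (2, [])], 3)

def Spec_get_reached_nodes (graph : List (Int × List Int)) (level : Int) (out : Int) : Prop := out = get_reached_nodes_alt graph level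
instance (graph : List (Int × List Int)) (level : Int) (out : Int) : Decidable (Spec_get_reached_nodes graph level out) := by unfold Spec_get_reached_nodes; infer_instance

-- ===== CLAIM (what is proved, stated in full; the proofs are below) =====
def Claim_equal_get_reached_nodes : Prop := ∀ (graph : List (Int × List Int)) (level : Int), Dom_get_reached_nodes graph level → Pre_get_reached_nodes graph level → Spec_get_reached_nodes graph level (get_reached_nodes graph level)

-- ===== LEMMAS AND PROOFS =====

-- ---------- reachability spec pvRL: membership facts ----------

theorem pvAdj_mem_keys (graph : List (Int × List Int)) (p x : Int) (hx : x ∈ pvAdj graph p) :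
    p ∈ pvKeys graph := by
  by_contra hp
  have h := (PySem.Dict.get?_eq_none_iff_not_mem_keys (PySem.Dict.ofList graph) p).2 hp
  simp [pvAdj, h] at hx

theorem pvRL_succ_iff (graph : List (Int × List Int)) (k : Nat) (x : Int) :
    x ∈ pvRL graph (k + 1) ↔ x ∈ pvRL graph k ∨ ∃ p, p ∈ pvRL graph k ∧ x ∈ pvAdj graph p := by
  simp only [pvRL, List.mem_append, List.mem_flatMap, List.mem_filter, decide_eq_true_eq]
  constructor
  · rintro (h | ⟨p, ⟨hpk, hpr⟩, hx⟩)
    · exact Or.inl h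
    · exact Or.inr ⟨p, hpr, hx⟩
  · rintro (h | ⟨p, hpr, hx⟩)
    · exact Or.inl h
    · exact Or.inr ⟨p, ⟨pvAdj_mem_keys graph p x hx, hpr⟩, hx⟩

theorem pvRL_mono (graph : List (Int × List Int)) {k m : Nat} (h : k ≤ m) {x : Int}
    (hx : x ∈ pvRL graph k) : x ∈ pvRL graph m := by
  induction m with
  | zero =>
    have hk : k = 0 := by omega
    exact hk ▸ hx
  | succ m ih =>
    by_cases hk : k = m + 1
    · exact hk ▸ hx
    · exact (pvRL_succ_iff graph m x).2 (Or.inl (ih (by omega)))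

theorem pvRL_adj_succ (graph : List (Int × List Int)) {k : Nat} {p x : Int}
    (hp : p ∈ pvRL graph k) (hx : x ∈ pvAdj graph p) : x ∈ pvRL graph (k + 1) :=
  (pvRL_succ_iff graph k x).2 (Or.inr ⟨p, hp, hx⟩)

-- once one level adds nothing, all later levels agree with it
theorem pvRL_stable (graph : List (Int × List Int)) {j : Nat}
    (hstab : ∀ x, x ∈ pvRL graph (j + 1) → x ∈ pvRL graph j) :
    ∀ m, j ≤ m → ∀ x, (x ∈ pvRL graph m ↔ x ∈ pvRL graph j) := by
  intro m hm
  induction m, hm using Nat.le_induction with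
  | base => intro x; exact Iff.rfl
  | succ m hm ih =>
    intro x
    constructor
    · intro hx
      rcases (pvRL_succ_iff graph m x).1 hx with h | ⟨p, hp, hpa⟩
      · exact (ih x).1 h
      · exact hstab x (pvRL_adj_succ graph ((ih p).1 hp) hpa)
    · intro hx
      exact pvRL_mono graph (by omega) hx

-- ---------- saturation: pvRL stabilises within #keys levels ----------

theorem pvCountP_eq_imp {l : List Int} {p q : Int → Bool}
    (hpq : ∀ a ∈ l, p a → q a) (hc : l.countP q ≤ l.countP p) :
    ∀ a ∈ l, q a → p a := by
  induction l with
  | nil => intro a ha; simp at ha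
  | cons b l ih =>
    intro a ha hqa
    have hmono : l.countP p ≤ l.countP q :=
      List.countP_mono_left (fun x hx => hpq x (List.mem_cons_of_mem b hx))
    rw [List.countP_cons, List.countP_cons] at hc
    by_cases hpb : p b
    · have hqb : q b := hpq b List.mem_cons_self hpb
      rcases List.mem_cons.1 ha with rfl | ha'
      · exact hpb
      · exact ih (fun x hx => hpq x (List.mem_cons_of_mem b hx)) (by simp [hpb, hqb] at hc; omega) a ha' hqa
    · by_cases hqb : q b
      · simp [hpb, hqb] at hc
        omega
      · rcases List.mem_cons.1 ha with rfl | ha'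
        · exact absurd hqa (by simp [hqb])
        · exact ih (fun x hx => hpq x (List.mem_cons_of_mem b hx)) (by simp [hpb, hqb] at hc; omega) a ha' hqa

-- number of keys already reached at level j
def pvFj (graph : List (Int × List Int)) (j : Nat) : Nat :=
  (pvKeys graph).countP (fun p => decide (p ∈ pvRL graph j))

theorem pvFj_chain (graph : List (Int × List Int)) :
    ∀ n, (∀ j, j < n → pvFj graph j < pvFj graph (j + 1)) → n + pvFj graph 0 ≤ pvFj graph n := by
  intro n
  induction n with
  | zero => intro _; omega
  | succ n ih =>
    intro h
    have h1 := ih (fun j hj => h j (by omega))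
    have h2 := h n (by omega)
    omega

theorem pvStable_exists (graph : List (Int × List Int)) :
    ∃ j, j ≤ (pvKeys graph).length ∧ ∀ x, x ∈ pvRL graph (j + 1) → x ∈ pvRL graph j := by
  by_cases h0 : (0 : Int) ∈ pvKeys graph
  · by_cases hex : ∃ j, j < (pvKeys graph).length ∧ pvFj graph (j + 1) ≤ pvFj graph j
    · obtain ⟨j, hj, hle⟩ := hex
      refine ⟨j + 1, by omega, ?_⟩
      have hkeys : ∀ p ∈ pvKeys graph, p ∈ pvRL graph (j + 1) → p ∈ pvRL graph j := by
        have := pvCountP_eq_imp (l := pvKeys graph)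
          (p := fun p => decide (p ∈ pvRL graph j))
          (q := fun p => decide (p ∈ pvRL graph (j + 1)))
          (fun a _ ha => by
            simp only [decide_eq_true_eq] at ha ⊢
            exact pvRL_mono graph (by omega) ha)
          hle
        intro p hp hpr
        have := this p hp (by simpa using hpr)
        simpa using this
      intro x hx
      rcases (pvRL_succ_iff graph (j + 1) x).1 hx with h | ⟨p, hp, hpa⟩
      · exact h
      · have hpk : p ∈ pvKeys graph := pvAdj_mem_keys graph p x hpa
        exact pvRL_adj_succ graph (hkeys p hpk hp) hpa
    · exfalso
      push_neg at hex
      have hchain := pvFj_chain graph (pvKeys graph).length (fun j hj => hex j hj)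
      have hbound : pvFj graph (pvKeys graph).length ≤ (pvKeys graph).length := by
        rw [pvFj]; exact List.countP_le_length
      have hpos : 0 < pvFj graph 0 := by
        rw [pvFj, List.countP_pos_iff]
        exact ⟨0, h0, by simp [pvRL]⟩
      omega
  · refine ⟨0, by omega, ?_⟩
    intro x hx
    rcases (pvRL_succ_iff graph 0 x).1 hx with h | ⟨p, hp, hpa⟩
    · exact h
    · exact absurd (pvAdj_mem_keys graph p x hpa) (by
        have : p = 0 := by simpa [pvRL] using hp
        rw [this]; exact h0)

theorem pvKeys_length_eq_size (graph : List (Int × List Int)) :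
    (pvKeys graph).length = (PySem.Dict.ofList graph).size := by
  simp [pvKeys, PySem.Dict.keys, PySem.Dict.size]

theorem pvSaturate (graph : List (Int × List Int)) (m : Nat) (x : Int)
    (hx : x ∈ pvRL graph m) : x ∈ pvRL graph (min m (PySem.Dict.ofList graph).size) := by
  by_cases hm : m ≤ (PySem.Dict.ofList graph).size
  · rwa [Nat.min_eq_left hm]
  · rw [Nat.min_eq_right (by omega)]
    obtain ⟨j, hj, hstab⟩ := pvStable_exists graph
    rw [pvKeys_length_eq_size] at hj
    have h1 := (pvRL_stable graph hstab m (by omega) x).1 hx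
    exact pvRL_mono graph hj h1

-- ---------- A side: scan-new characterisation of one BFS round ----------

-- the list of elements of L that are new (not in w and not seen earlier in L), in scan order
def pvScanNew : List Int → List Int → List Int
  | [], _ => []
  | a :: rest, w => if a ∈ w then pvScanNew rest w else a :: pvScanNew rest (w ++ [a])

theorem pvScanNew_mem (L : List Int) : ∀ w x, x ∈ pvScanNew L w ↔ x ∈ L ∧ x ∉ w := by
  induction L with
  | nil => intro w x; simp [pvScanNew]
  | cons a rest ih =>
    intro w x
    simp only [pvScanNew]
    by_cases ha : a ∈ w
    · rw [if_pos ha, ih]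
      constructor
      · rintro ⟨h1, h2⟩; exact ⟨List.mem_cons_of_mem a h1, h2⟩
      · rintro ⟨h1, h2⟩
        rcases List.mem_cons.1 h1 with rfl | h1'
        · exact absurd ha h2
        · exact ⟨h1', h2⟩
    · rw [if_neg ha]
      simp only [List.mem_cons, ih]
      constructor
      · rintro (rfl | ⟨h1, h2⟩)
        · exact ⟨Or.inl rfl, ha⟩
        · exact ⟨Or.inr h1, fun hw => h2 (by simp [hw])⟩
      · rintro ⟨rfl | h1, h2⟩
        · exact Or.inl rfl
        · by_cases hxa : x = a
          · exact Or.inl hxa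
          · exact Or.inr ⟨h1, by simp [h2, hxa]⟩

theorem pvScanNew_not_mem (L : List Int) : ∀ w x, x ∈ pvScanNew L w → x ∉ w := by
  intro w x hx
  exact ((pvScanNew_mem L w x).1 hx).2

theorem pvScanNew_nodup (L : List Int) : ∀ w, (pvScanNew L w).Nodup := by
  induction L with
  | nil => intro w; simp [pvScanNew]
  | cons a rest ih =>
    intro w
    simp only [pvScanNew]
    by_cases ha : a ∈ w
    · rw [if_pos ha]; exact ih w
    · rw [if_neg ha]
      refine List.nodup_cons.2 ⟨fun hmem => ?_, ih (w ++ [a])⟩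
      exact pvScanNew_not_mem rest (w ++ [a]) a hmem (by simp)

theorem pvScanNew_append (L₁ L₂ : List Int) : ∀ w,
    pvScanNew (L₁ ++ L₂) w = pvScanNew L₁ w ++ pvScanNew L₂ (w ++ pvScanNew L₁ w) := by
  induction L₁ with
  | nil => intro w; simp [pvScanNew]
  | cons a rest ih =>
    intro w
    simp only [List.cons_append, pvScanNew]
    by_cases ha : a ∈ w
    · rw [if_pos ha, if_pos ha]; exact ih w
    · rw [if_neg ha, if_neg ha]
      rw [ih (w ++ [a])]
      simp [List.append_assoc]

-- A's 'for adj in graph[aux]' body over one adjacency list L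
theorem pvFoldStep_eq (L : List Int) : ∀ (v : PySem.Set Int) (nxt : List Int),
    L.foldl (fun (st : PySem.Set Int × List Int) adj =>
        if PySem.Set.contains st.1 adj then st else (PySem.Set.add st.1 adj, st.2 ++ [adj])) (v, nxt)
      = (v ++ pvScanNew L v, nxt ++ pvScanNew L v) := by
  induction L with
  | nil => intro v nxt; simp [pvScanNew]
  | cons a rest ih =>
    intro v nxt
    simp only [List.foldl_cons, pvScanNew]
    by_cases ha : a ∈ v
    · have hc : PySem.Set.contains v a = true := (PySem.Set.contains_iff v a).2 ha
      rw [if_pos ha]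
      simp only [hc, if_pos]
      exact ih v nxt
    · have hc : ¬ PySem.Set.contains v a = true := fun h => ha ((PySem.Set.contains_iff v a).1 h)
      rw [if_neg ha]
      simp only [hc, if_neg, Bool.not_eq_true]
      rw [PySem.Set.add_of_not_mem ha]
      rw [ih (v ++ [a]) (nxt ++ [a])]
      simp [List.append_assoc]

theorem pvInnerA_eq (graph : List (Int × List Int)) (ln : List Int) : ∀ (v : PySem.Set Int) (nxt : List Int),
    pvInnerA graph ln (v, nxt)
      = (v ++ pvScanNew (ln.flatMap (pvAdj graph)) v, nxt ++ pvScanNew (ln.flatMap (pvAdj graph)) v) := by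
  induction ln with
  | nil => intro v nxt; simp [pvInnerA, pvScanNew]
  | cons aux rest ih =>
    intro v nxt
    simp only [pvInnerA, List.flatMap_cons]
    rw [pvFoldStep_eq, ih]
    rw [pvScanNew_append]
    simp [List.append_assoc]

-- A's whole loop: visited members are exactly pvRL (k + fuel)
theorem pvOuterA_char (graph : List (Int × List Int)) :
    ∀ (fuel k : Nat) (v : PySem.Set Int) (f : List Int),
      v.Nodup →
      (∀ x, x ∈ v ↔ x ∈ pvRL graph k) →
      (∀ x, x ∈ pvRL graph (k + 1) ↔ (x ∈ v ∨ ∃ p ∈ f, x ∈ pvAdj graph p)) →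
      (pvOuterA graph fuel f v).Nodup ∧
        ∀ x, x ∈ pvOuterA graph fuel f v ↔ x ∈ pvRL graph (k + fuel) := by
  intro fuel
  induction fuel with
  | zero => intro k v f hnd hv _; exact ⟨hnd, by simpa using hv⟩
  | succ fuel ih =>
    intro k v f hnd hv hf
    cases f with
    | nil =>
      refine ⟨hnd, ?_⟩
      have hstab : ∀ x, x ∈ pvRL graph (k + 1) → x ∈ pvRL graph k := by
        intro x hx
        rcases (hf x).1 hx with h | ⟨p, hp, _⟩
        · exact (hv x).1 h
        · simp at hp
      intro x
      show x ∈ pvOuterA graph (fuel + 1) [] v ↔ _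
      rw [show pvOuterA graph (fuel + 1) [] v = v from rfl]
      rw [hv x, ← pvRL_stable graph hstab (k + (fuel + 1)) (by omega) x]
    | cons a l =>
      have hstep : pvOuterA graph (fuel + 1) (a :: l) v =
          pvOuterA graph fuel (pvInnerA graph (a :: l) (v, [])).2 (pvInnerA graph (a :: l) (v, [])).1 := rfl
      set S := pvScanNew ((a :: l).flatMap (pvAdj graph)) v with hS
      have hinner := pvInnerA_eq graph (a :: l) v []
      have hSmem : ∀ x, x ∈ S ↔ ((∃ p ∈ a :: l, x ∈ pvAdj graph p) ∧ x ∉ v) := by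
        intro x
        rw [hS, pvScanNew_mem]
        simp [List.mem_flatMap]
      have hv' : ∀ x, x ∈ v ++ S ↔ x ∈ pvRL graph (k + 1) := by
        intro x
        rw [List.mem_append, hSmem, hf x]
        by_cases hxv : x ∈ v <;> tauto
      have hdisj : List.Disjoint v S := by
        intro y hyv hyS
        exact pvScanNew_not_mem _ _ y hyS hyv
      have hnd' : (v ++ S).Nodup := List.Nodup.append hnd (pvScanNew_nodup _ _) hdisj
      have hf' : ∀ x, x ∈ pvRL graph (k + 1 + 1) ↔ (x ∈ v ++ S ∨ ∃ p ∈ S, x ∈ pvAdj graph p) := by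
        intro x
        rw [pvRL_succ_iff]
        constructor
        · rintro (h | ⟨p, hp, hpa⟩)
          · exact Or.inl ((hv' x).2 h)
          · rcases List.mem_append.1 ((hv' p).2 hp) with hpv | hpS
            · have hpr : p ∈ pvRL graph k := (hv p).1 hpv
              exact Or.inl ((hv' x).2 (pvRL_adj_succ graph hpr hpa))
            · exact Or.inr ⟨p, hpS, hpa⟩
        · rintro (h | ⟨p, hp, hpa⟩)
          · exact Or.inl ((hv' x).1 h)
          · have hpr : p ∈ pvRL graph (k + 1) := (hv' p).1 (List.mem_append_right v hp)
            exact Or.inr ⟨p, hpr, hpa⟩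
      have hstep2 : pvOuterA graph (fuel + 1) (a :: l) v = pvOuterA graph fuel S (v ++ S) := by
        rw [hstep, hinner]
        rfl
      obtain ⟨hnodup, hmem⟩ := ih (k + 1) (v ++ S) S hnd' hv' hf'
      rw [hstep2]
      refine ⟨hnodup, fun x => ?_⟩
      rw [hmem x]
      have he : k + 1 + fuel = k + (fuel + 1) := by omega
      rw [he]

-- ---------- B side: the distance table ----------

def pvSound (graph : List (Int × List Int)) (L : Nat) (dist : PySem.Dict Int Int) : Prop :=
  ∀ x v, dist.get? x = some v → ∃ k : Nat, v = (k : Int) ∧ k ≤ L ∧ x ∈ pvRL graph k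

def pvCompl (graph : List (Int × List Int)) (L i : Nat) (dist : PySem.Dict Int Int) : Prop :=
  ∀ k : Nat, k ≤ i → k ≤ L → ∀ x ∈ pvRL graph k, ∃ v, dist.get? x = some v ∧ v ≤ (k : Int)

def pvLe (d1 d2 : PySem.Dict Int Int) : Prop :=
  ∀ x v, d1.get? x = some v → ∃ v', d2.get? x = some v' ∧ v' ≤ v

theorem pvLe_refl (d : PySem.Dict Int Int) : pvLe d d :=
  fun _ v h => ⟨v, h, le_refl v⟩

theorem pvLe_trans {d1 d2 d3 : PySem.Dict Int Int} (h12 : pvLe d1 d2) (h23 : pvLe d2 d3) : pvLe d1 d3 := by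
  intro x v h
  obtain ⟨v', h', hle'⟩ := h12 x v h
  obtain ⟨v'', h'', hle''⟩ := h23 x v' h'
  exact ⟨v'', h'', le_trans hle'' hle'⟩

-- the inner relaxation step
def pvRStep (d : Int) (st : PySem.Dict Int Int × Bool) (a : Int) : PySem.Dict Int Int × Bool :=
  match st.1.get? a with
  | none => (st.1.insert a (d + 1), true)
  | some da => if d + 1 < da then (st.1.insert a (d + 1), true) else st

theorem pvRelaxB_eq (st : PySem.Dict Int Int × Bool) (d : Int) (nbrs : List Int) :
    pvRelaxB st d nbrs = nbrs.foldl (pvRStep d) st := rfl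

def pvStepB (level : Int) (st : PySem.Dict Int Int × Bool) (p : Int × List Int) :
    PySem.Dict Int Int × Bool :=
  match st.1.get? p.1 with
  | some d => if d ≤ level - 2 then pvRelaxB st d p.2 else st
  | none => st

theorem pvRoundB_eq (level : Int) (items : List (Int × List Int)) (dist : PySem.Dict Int Int) :
    pvRoundB level items dist = items.foldl (pvStepB level) (dist, false) := rfl

theorem pvRStep_le (d : Int) (st : PySem.Dict Int Int × Bool) (a : Int) :
    pvLe st.1 (pvRStep d st a).1 := by
  intro x v hx
  unfold pvRStep
  cases h : st.1.get? a with
  | none =>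
    have hxa : x ≠ a := fun he => by rw [he, h] at hx; simp at hx
    dsimp only
    rw [PySem.Dict.get?_insert, if_neg hxa]
    exact ⟨v, hx, le_refl v⟩
  | some da =>
    dsimp only
    by_cases hlt : d + 1 < da
    · rw [if_pos hlt]
      by_cases hxa : x = a
      · subst hxa
        rw [h] at hx
        obtain rfl : da = v := Option.some.inj hx
        refine ⟨d + 1, ?_, by omega⟩
        dsimp only
        rw [PySem.Dict.get?_insert, if_pos rfl]
      · refine ⟨v, ?_, le_refl v⟩
        dsimp only
        rw [PySem.Dict.get?_insert, if_neg hxa]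
        exact hx
    · rw [if_neg hlt]
      exact ⟨v, hx, le_refl v⟩

theorem pvLe_foldl {β : Type} (f : (PySem.Dict Int Int × Bool) → β → (PySem.Dict Int Int × Bool))
    (hf : ∀ st b, pvLe st.1 (f st b).1) :
    ∀ (l : List β) (st : PySem.Dict Int Int × Bool), pvLe st.1 (l.foldl f st).1 := by
  intro l
  induction l with
  | nil => intro st; exact pvLe_refl _
  | cons b r ih => intro st; exact pvLe_trans (hf st b) (ih (f st b))

theorem pvStepB_le (level : Int) (st : PySem.Dict Int Int × Bool) (p : Int × List Int) :
    pvLe st.1 (pvStepB level st p).1 := by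
  unfold pvStepB
  cases h : st.1.get? p.1 with
  | none => exact pvLe_refl _
  | some d =>
    by_cases hle : d ≤ level - 2
    · simp only [if_pos hle]
      rw [pvRelaxB_eq]
      exact pvLe_foldl (pvRStep d) (pvRStep_le d) p.2 st
    · simp only [if_neg hle]
      exact pvLe_refl _

-- after relaxing nbrs from value d, every a ∈ nbrs has an entry ≤ d + 1
theorem pvRelax_get (d : Int) (nbrs : List Int) :
    ∀ (st : PySem.Dict Int Int × Bool) (a : Int), a ∈ nbrs →
      ∃ v, (pvRelaxB st d nbrs).1.get? a = some v ∧ v ≤ d + 1 := by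
  induction nbrs with
  | nil => intro st a ha; simp at ha
  | cons b rest ih =>
    intro st a ha
    rw [pvRelaxB_eq, List.foldl_cons, ← pvRelaxB_eq]
    rcases List.mem_cons.1 ha with rfl | ha'
    · by_cases hr : a ∈ rest
      · exact ih (pvRStep d st a) a hr
      · have hstep : ∃ v, (pvRStep d st a).1.get? a = some v ∧ v ≤ d + 1 := by
          unfold pvRStep
          cases h : st.1.get? a with
          | none => exact ⟨d + 1, by dsimp only; rw [PySem.Dict.get?_insert, if_pos rfl], le_refl _⟩
          | some da =>
            dsimp only
            by_cases hlt : d + 1 < da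
            · exact ⟨d + 1, by rw [if_pos hlt]; dsimp only; rw [PySem.Dict.get?_insert, if_pos rfl], le_refl _⟩
            · exact ⟨da, by rw [if_neg hlt]; exact h, by omega⟩
        obtain ⟨v, hv, hvle⟩ := hstep
        obtain ⟨v', hv', hvle'⟩ :=
          pvLe_foldl (pvRStep d) (pvRStep_le d) rest (pvRStep d st a) a v hv
        rw [← pvRelaxB_eq] at hv'
        exact ⟨v', hv', by omega⟩
    · exact ih (pvRStep d st b) a ha'

-- generic foldl preservation
theorem pvFoldlPres {α β : Type} (P : α → Prop) (f : α → β → α) (l : List β)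
    (hf : ∀ a b, b ∈ l → P a → P (f a b)) (a : α) (ha : P a) : P (l.foldl f a) := by
  induction l generalizing a with
  | nil => exact ha
  | cons b r ih =>
    exact ih (fun a' b' hb' h => hf a' b' (List.mem_cons_of_mem b hb') h) (f a b) (hf a b List.mem_cons_self ha)

theorem pvRelax_sound (graph : List (Int × List Int)) (L : Nat) (k0 : Nat)
    (hk0 : k0 + 1 ≤ L) (nbrs : List Int) (hnb : ∀ a ∈ nbrs, a ∈ pvRL graph (k0 + 1))
    (st : PySem.Dict Int Int × Bool) (hs : pvSound graph L st.1) :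
    pvSound graph L (pvRelaxB st ((k0 : Nat) : Int) nbrs).1 := by
  rw [pvRelaxB_eq]
  refine pvFoldlPres (fun st => pvSound graph L st.1) (pvRStep (k0 : Int)) nbrs ?_ st hs
  intro st' a ha hs'
  unfold pvRStep
  cases h : st'.1.get? a with
  | none =>
    dsimp only
    intro x v hx
    rw [PySem.Dict.get?_insert] at hx
    by_cases hxa : x = a
    · rw [if_pos hxa] at hx
      obtain rfl : (k0 : Int) + 1 = v := Option.some.inj hx
      exact ⟨k0 + 1, by push_cast; ring, hk0, hxa ▸ hnb a ha⟩
    · rw [if_neg hxa] at hx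
      exact hs' x v hx
  | some da =>
    dsimp only
    by_cases hlt : (k0 : Int) + 1 < da
    · rw [if_pos hlt]
      intro x v hx
      rw [PySem.Dict.get?_insert] at hx
      by_cases hxa : x = a
      · rw [if_pos hxa] at hx
        obtain rfl : (k0 : Int) + 1 = v := Option.some.inj hx
        exact ⟨k0 + 1, by push_cast; ring, hk0, hxa ▸ hnb a ha⟩
      · rw [if_neg hxa] at hx
        exact hs' x v hx
    · rw [if_neg hlt]
      exact hs'

theorem pvStepB_sound (graph : List (Int × List Int)) (level : Int)
    (st : PySem.Dict Int Int × Bool) (p : Int × List Int)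
    (hp : p ∈ (PySem.Dict.ofList graph).items)
    (hs : pvSound graph (level - 1).toNat st.1) :
    pvSound graph (level - 1).toNat (pvStepB level st p).1 := by
  unfold pvStepB
  cases h : st.1.get? p.1 with
  | none => exact hs
  | some d =>
    by_cases hle : d ≤ level - 2
    · simp only [if_pos hle]
      obtain ⟨k0, rfl, hk0L, hk0r⟩ := hs p.1 d h
      have hpk : p.1 ∈ pvKeys graph := by
        have := PySem.Dict.mem_keys_of_mem_items (d := PySem.Dict.ofList graph) hp
        simpa [pvKeys] using this
      have hadj : pvAdj graph p.1 = p.2 := by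
        have hg := PySem.Dict.get?_of_mem_items (PySem.Dict.ofList graph)
          (by exact hp) (PySem.Dict.nodup_keys_ofList graph)
        simp [pvAdj, hg]
      have hnb : ∀ a ∈ p.2, a ∈ pvRL graph (k0 + 1) := by
        intro a ha
        exact pvRL_adj_succ graph hk0r (by rw [hadj]; exact ha)
      have hk0L' : k0 + 1 ≤ (level - 1).toNat := by omega
      exact pvRelax_sound graph (level - 1).toNat k0 hk0L' p.2 hnb st hs
    · simp only [if_neg hle]
      exact hs

theorem pvRound_sound (graph : List (Int × List Int)) (level : Int) (dist : PySem.Dict Int Int)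
    (hs : pvSound graph (level - 1).toNat dist) :
    pvSound graph (level - 1).toNat (pvRoundB level (PySem.Dict.ofList graph).items dist).1 := by
  rw [pvRoundB_eq]
  exact pvFoldlPres (fun st => pvSound graph (level - 1).toNat st.1) (pvStepB level)
    (PySem.Dict.ofList graph).items
    (fun st p hp h => pvStepB_sound graph level st p hp h) (dist, false) hs

theorem pvRound_compl (graph : List (Int × List Int)) (level : Int) (i : Nat)
    (dist : PySem.Dict Int Int)
    (hc : pvCompl graph (level - 1).toNat i dist) :
    pvCompl graph (level - 1).toNat (i + 1) (pvRoundB level (PySem.Dict.ofList graph).items dist).1 := by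
  intro k hk hkL x hx
  have hle : pvLe dist (pvRoundB level (PySem.Dict.ofList graph).items dist).1 := by
    rw [pvRoundB_eq]
    exact pvLe_foldl (pvStepB level) (pvStepB_le level) (PySem.Dict.ofList graph).items (dist, false)
  by_cases hki : k ≤ i
  · obtain ⟨v, hv, hvle⟩ := hc k hki hkL x hx
    obtain ⟨v', hv', hvle'⟩ := hle x v hv
    exact ⟨v', hv', by omega⟩
  · have hk' : k = i + 1 := by omega
    subst hk'
    rcases (pvRL_succ_iff graph i x).1 hx with hxi | ⟨p, hpr, hpa⟩
    · obtain ⟨v, hv, hvle⟩ := hc i (le_refl i) (by omega) x hxi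
      obtain ⟨v', hv', hvle'⟩ := hle x v hv
      exact ⟨v', hv', by push_cast; omega⟩
    · -- relaxation through the item of p
      have hpk : p ∈ pvKeys graph := pvAdj_mem_keys graph p x hpa
      have hpget : ∃ lp, (PySem.Dict.ofList graph).get? p = some lp := by
        cases hg : (PySem.Dict.ofList graph).get? p with
        | none =>
          exact absurd ((PySem.Dict.get?_eq_none_iff_not_mem_keys _ p).1 hg) (by simpa [pvKeys] using hpk)
        | some lp => exact ⟨lp, rfl⟩
      obtain ⟨lp, hg⟩ := hpget
      have hitem : (p, lp) ∈ (PySem.Dict.ofList graph).items :=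
        PySem.Dict.mem_items_of_get?_eq_some _ hg
      have hxlp : x ∈ lp := by
        have : pvAdj graph p = lp := by simp [pvAdj, hg]
        rwa [this] at hpa
      obtain ⟨vp, hvp, hvple⟩ := hc i (le_refl i) (by omega) p hpr
      obtain ⟨s, t, hst⟩ := List.append_of_mem hitem
      rw [pvRoundB_eq, hst, List.foldl_append, List.foldl_cons]
      set st1 := s.foldl (pvStepB level) (dist, false) with hst1
      have hle1 : pvLe dist st1.1 := pvLe_foldl (pvStepB level) (pvStepB_le level) s (dist, false)
      obtain ⟨vp', hvp', hvple'⟩ := hle1 p vp hvp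
      have hguard : vp' ≤ level - 2 := by omega
      have hstep : pvStepB level st1 (p, lp) = pvRelaxB st1 vp' lp := by
        unfold pvStepB
        dsimp only
        rw [hvp']
        dsimp only
        rw [if_pos hguard]
      rw [hstep]
      obtain ⟨v, hv, hvle⟩ := pvRelax_get vp' lp st1 x hxlp
      obtain ⟨v', hv', hvle'⟩ :=
        pvLe_foldl (pvStepB level) (pvStepB_le level) t (pvRelaxB st1 vp' lp) x v hv
      refine ⟨v', hv', ?_⟩
      push_cast
      omega

-- ---------- early exit: changed = False means the table is a fixed point ----------

theorem pvRStep_flag_mono (d : Int) (st : PySem.Dict Int Int × Bool) (a : Int)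
    (h : st.2 = true) : (pvRStep d st a).2 = true := by
  unfold pvRStep
  cases hg : st.1.get? a with
  | none => rfl
  | some da =>
    by_cases hlt : d + 1 < da
    · simp [if_pos hlt]
    · simp [if_neg hlt, h]

theorem pvFlag_foldl_mono {β : Type} (f : (PySem.Dict Int Int × Bool) → β → (PySem.Dict Int Int × Bool))
    (hf : ∀ st b, st.2 = true → (f st b).2 = true) :
    ∀ (l : List β) st, st.2 = true → (l.foldl f st).2 = true := by
  intro l
  induction l with
  | nil => intro st h; exact h
  | cons b r ih => intro st h; exact ih (f st b) (hf st b h)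

theorem pvFlag_foldl_id {β : Type} (f : (PySem.Dict Int Int × Bool) → β → (PySem.Dict Int Int × Bool))
    (hmono : ∀ st b, st.2 = true → (f st b).2 = true)
    (hid : ∀ st b, (f st b).2 = false → f st b = st) :
    ∀ (l : List β) st, (l.foldl f st).2 = false → l.foldl f st = st := by
  intro l
  induction l with
  | nil => intro st _; rfl
  | cons b r ih =>
    intro st h
    rw [List.foldl_cons] at h ⊢
    have hfb : (f st b).2 = false := by
      cases h2 : (f st b).2 with
      | false => rfl
      | true => exact absurd (pvFlag_foldl_mono f hmono r (f st b) h2) (by simp [h])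
    rw [hid st b hfb] at h ⊢
    exact ih st h

theorem pvRStep_id (d : Int) (st : PySem.Dict Int Int × Bool) (a : Int)
    (h : (pvRStep d st a).2 = false) : pvRStep d st a = st := by
  unfold pvRStep at h ⊢
  cases hg : st.1.get? a with
  | none => rw [hg] at h; simp at h
  | some da =>
    rw [hg] at h
    dsimp only at h ⊢
    by_cases hlt : d + 1 < da
    · rw [if_pos hlt] at h; simp at h
    · rw [if_neg hlt]

theorem pvStepB_flag_mono (level : Int) (st : PySem.Dict Int Int × Bool) (p : Int × List Int)
    (h : st.2 = true) : (pvStepB level st p).2 = true := by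
  unfold pvStepB
  cases hg : st.1.get? p.1 with
  | none => exact h
  | some d =>
    by_cases hle : d ≤ level - 2
    · simp only [if_pos hle]
      rw [pvRelaxB_eq]
      exact pvFlag_foldl_mono (pvRStep d) (pvRStep_flag_mono d) p.2 st h
    · simp only [if_neg hle]; exact h

theorem pvStepB_id (level : Int) (st : PySem.Dict Int Int × Bool) (p : Int × List Int)
    (h : (pvStepB level st p).2 = false) : pvStepB level st p = st := by
  unfold pvStepB at h ⊢
  cases hg : st.1.get? p.1 with
  | none => rfl
  | some d =>
    rw [hg] at h
    dsimp only at h ⊢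
    by_cases hle : d ≤ level - 2
    · rw [if_pos hle] at h ⊢
      rw [pvRelaxB_eq] at h ⊢
      exact pvFlag_foldl_id (pvRStep d) (pvRStep_flag_mono d) (pvRStep_id d) p.2 st h
    · rw [if_neg hle]

theorem pvRoundB_fixed (level : Int) (items : List (Int × List Int)) (dist : PySem.Dict Int Int)
    (h : (pvRoundB level items dist).2 = false) : pvRoundB level items dist = (dist, false) := by
  rw [pvRoundB_eq] at h ⊢
  exact pvFlag_foldl_id (pvStepB level) (pvStepB_flag_mono level) (pvStepB_id level) items (dist, false) h

theorem pvFix_compl (graph : List (Int × List Int)) (level : Int) (i : Nat) (dist : PySem.Dict Int Int)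
    (hfix : pvRoundB level (PySem.Dict.ofList graph).items dist = (dist, false))
    (hc : pvCompl graph (level - 1).toNat i dist) :
    ∀ j, pvCompl graph (level - 1).toNat j dist := by
  intro j
  induction j with
  | zero => intro k hk hkL x hx; exact hc k (by omega) hkL x hx
  | succ j ih =>
    have := pvRound_compl graph level j dist ih
    rwa [hfix] at this

theorem pvRounds_sc (graph : List (Int × List Int)) (level : Int) :
    ∀ (n i : Nat) (dist : PySem.Dict Int Int),
      pvSound graph (level - 1).toNat dist →
      pvCompl graph (level - 1).toNat i dist →
      pvSound graph (level - 1).toNat (pvRoundsB level (PySem.Dict.ofList graph).items n dist) ∧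
      pvCompl graph (level - 1).toNat (i + n) (pvRoundsB level (PySem.Dict.ofList graph).items n dist) := by
  intro n
  induction n with
  | zero => intro i dist hs hc; exact ⟨hs, by simpa using hc⟩
  | succ n ih =>
    intro i dist hs hc
    show pvSound _ _ (pvRoundsB level _ (n+1) dist) ∧ _
    rw [pvRoundsB]
    set st := pvRoundB level (PySem.Dict.ofList graph).items dist with hstdef
    by_cases hch : st.2 = true
    · rw [if_pos hch]
      have hs' : pvSound graph (level - 1).toNat st.1 := pvRound_sound graph level dist hs
      have hc' : pvCompl graph (level - 1).toNat (i + 1) st.1 := pvRound_compl graph level i dist hc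
      obtain ⟨h1, h2⟩ := ih (i + 1) st.1 hs' hc'
      refine ⟨h1, ?_⟩
      intro k hk hkL x hx
      exact h2 k (by omega) hkL x hx
    · rw [if_neg hch]
      have hfix : pvRoundB level (PySem.Dict.ofList graph).items dist = (dist, false) := by
        apply pvRoundB_fixed
        rw [← hstdef]
        cases h2 : st.2 with
        | false => rfl
        | true => exact absurd h2 hch
      have hst1 : st.1 = dist := by rw [hstdef, hfix]
      rw [hst1]
      exact ⟨hs, pvFix_compl graph level i dist hfix hc (i + (n + 1))⟩

-- keys stay Nodup through the relaxation
theorem pvRStep_nodup (d : Int) (st : PySem.Dict Int Int × Bool) (a : Int)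
    (h : st.1.keys.Nodup) : (pvRStep d st a).1.keys.Nodup := by
  unfold pvRStep
  cases hg : st.1.get? a with
  | none => exact PySem.Dict.nodup_keys_insert _ _ _ h
  | some da =>
    by_cases hlt : d + 1 < da
    · simp only [if_pos hlt]
      exact PySem.Dict.nodup_keys_insert _ _ _ h
    · simp only [if_neg hlt]; exact h

theorem pvStepB_nodup (level : Int) (st : PySem.Dict Int Int × Bool) (p : Int × List Int)
    (h : st.1.keys.Nodup) : (pvStepB level st p).1.keys.Nodup := by
  unfold pvStepB
  cases hg : st.1.get? p.1 with
  | none => exact h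
  | some d =>
    by_cases hle : d ≤ level - 2
    · simp only [if_pos hle]
      rw [pvRelaxB_eq]
      exact pvFoldlPres (fun st => st.1.keys.Nodup) (pvRStep d) p.2
        (fun st' a _ h' => pvRStep_nodup d st' a h') st h
    · simp only [if_neg hle]; exact h

theorem pvRoundsB_nodup (level : Int) (items : List (Int × List Int)) :
    ∀ (n : Nat) (dist : PySem.Dict Int Int), dist.keys.Nodup →
      (pvRoundsB level items n dist).keys.Nodup := by
  intro n
  induction n with
  | zero => intro dist h; exact h
  | succ n ih =>
    intro dist h
    rw [pvRoundsB]
    have hround : (pvRoundB level items dist).1.keys.Nodup := by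
      rw [pvRoundB_eq]
      exact pvFoldlPres (fun st => st.1.keys.Nodup) (pvStepB level) items
        (fun st' p _ h' => pvStepB_nodup level st' p h') (dist, false) h
    by_cases hch : (pvRoundB level items dist).2 = true
    · rw [if_pos hch]; exact ih _ hround
    · rw [if_neg hch]; exact hround

-- the final table of B: its key set is exactly pvRL (level-1)
theorem pvFinalB_char (graph : List (Int × List Int)) (level : Int) :
    (pvRoundsB level (PySem.Dict.ofList graph).items (PySem.Dict.ofList graph).size
        ((PySem.Dict.empty : PySem.Dict Int Int).insert 0 0)).keys.Nodup ∧
    ∀ x, x ∈ (pvRoundsB level (PySem.Dict.ofList graph).items (PySem.Dict.ofList graph).size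
        ((PySem.Dict.empty : PySem.Dict Int Int).insert 0 0)).keys ↔
      x ∈ pvRL graph (level - 1).toNat := by
  set dist0 : PySem.Dict Int Int := (PySem.Dict.empty : PySem.Dict Int Int).insert 0 0 with hdist0
  have hget0 : ∀ x v, dist0.get? x = some v → x = 0 ∧ v = 0 := by
    intro x v h
    rw [hdist0, PySem.Dict.get?_insert] at h
    by_cases hx0 : x = 0
    · rw [if_pos hx0] at h
      exact ⟨hx0, (Option.some.inj h).symm⟩
    · rw [if_neg hx0, PySem.Dict.get?_empty] at h
      simp at h
  have hs0 : pvSound graph (level - 1).toNat dist0 := by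
    intro x v h
    obtain ⟨rfl, rfl⟩ := hget0 x v h
    exact ⟨0, by norm_num, by omega, by simp [pvRL]⟩
  have hc0 : pvCompl graph (level - 1).toNat 0 dist0 := by
    intro k hk _ x hx
    obtain rfl : k = 0 := by omega
    have hx0 : x = 0 := by simpa [pvRL] using hx
    refine ⟨0, ?_, by simp⟩
    rw [hx0, hdist0, PySem.Dict.get?_insert, if_pos rfl]
  obtain ⟨hsF, hcF⟩ := pvRounds_sc graph level (PySem.Dict.ofList graph).size 0 dist0 hs0 hc0
  set F := pvRoundsB level (PySem.Dict.ofList graph).items (PySem.Dict.ofList graph).size dist0 with hF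
  have hnd0 : dist0.keys.Nodup := by
    rw [hdist0]
    exact PySem.Dict.nodup_keys_insert _ _ _ (by simp [PySem.Dict.keys_empty])
  refine ⟨pvRoundsB_nodup level _ _ dist0 hnd0, fun x => ?_⟩
  constructor
  · intro hx
    have hsome : ∃ v, F.get? x = some v := by
      cases hg : F.get? x with
      | none => exact absurd ((PySem.Dict.get?_eq_none_iff_not_mem_keys F x).1 hg) (by simp [hx])
      | some v => exact ⟨v, rfl⟩
    obtain ⟨v, hv⟩ := hsome
    obtain ⟨k, _, hkL, hkr⟩ := hsF x v hv
    exact pvRL_mono graph hkL hkr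
  · intro hx
    have hsat := pvSaturate graph (level - 1).toNat x hx
    have hmin1 : min (level - 1).toNat (PySem.Dict.ofList graph).size ≤ 0 + (PySem.Dict.ofList graph).size := by omega
    have hmin2 : min (level - 1).toNat (PySem.Dict.ofList graph).size ≤ (level - 1).toNat := by omega
    obtain ⟨v, hv, _⟩ := hcF (min (level - 1).toNat (PySem.Dict.ofList graph).size) hmin1 hmin2 x hsat
    by_contra hxk
    rw [(PySem.Dict.get?_eq_none_iff_not_mem_keys F x).2 hxk] at hv
    simp at hv

-- ===== VERDICT (by name: the statement is the Claim_ definition above) =====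
theorem get_reached_nodes_spec : Claim_equal_get_reached_nodes := by
  intro graph level _ _
  show get_reached_nodes graph level = get_reached_nodes_alt graph level
  unfold get_reached_nodes get_reached_nodes_alt
  -- A's visited set
  have hv0 : ∀ x, x ∈ (PySem.Set.add PySem.Set.empty 0 : PySem.Set Int) ↔ x ∈ pvRL graph 0 := by
    intro x; simp [PySem.Set.empty, PySem.Set.add, PySem.Set.contains, pvRL]
  have hf0 : ∀ x, x ∈ pvRL graph (0 + 1) ↔
      (x ∈ (PySem.Set.add PySem.Set.empty 0 : PySem.Set Int) ∨ ∃ p ∈ [(0 : Int)], x ∈ pvAdj graph p) := by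
    intro x
    rw [pvRL_succ_iff]
    constructor
    · rintro (h | ⟨p, hp, hpa⟩)
      · exact Or.inl ((hv0 x).2 h)
      · have : p = 0 := by simpa [pvRL] using hp
        exact Or.inr ⟨p, by simp [this], hpa⟩
    · rintro (h | ⟨p, hp, hpa⟩)
      · exact Or.inl ((hv0 x).1 h)
      · have : p = 0 := by simpa using hp
        exact Or.inr ⟨p, by simp [this, pvRL], hpa⟩
  have hnd0 : (PySem.Set.add PySem.Set.empty 0 : PySem.Set Int).Nodup := by
    simp [PySem.Set.empty, PySem.Set.add, PySem.Set.contains]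
  obtain ⟨hndA, hA⟩ := pvOuterA_char graph (level - 1).toNat 0
    (PySem.Set.add PySem.Set.empty 0) [0] hnd0 hv0 hf0
  obtain ⟨hndB, hB⟩ := pvFinalB_char graph level
  -- both are Nodup lists with the same members: equal lengths
  have hperm : (pvOuterA graph (level - 1).toNat [0] (PySem.Set.add PySem.Set.empty 0)).Perm
      (pvRoundsB level (PySem.Dict.ofList graph).items (PySem.Dict.ofList graph).size
        ((PySem.Dict.empty : PySem.Dict Int Int).insert 0 0)).keys := by
    rw [List.perm_ext_iff_of_nodup hndA hndB]
    intro x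
    rw [hA x, hB x]
    simp
  have hlen := hperm.length_eq
  have hsize : (pvRoundsB level (PySem.Dict.ofList graph).items (PySem.Dict.ofList graph).size
      ((PySem.Dict.empty : PySem.Dict Int Int).insert 0 0)).keys.length =
      (pvRoundsB level (PySem.Dict.ofList graph).items (PySem.Dict.ofList graph).size
      ((PySem.Dict.empty : PySem.Dict Int Int).insert 0 0)).size := by
    simp [PySem.Dict.keys, PySem.Dict.size]
  simp only [PySem.Set.len]
  rw [hlen, hsize]
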